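-- pv_equiv track=rewrite | github.com/jrissiotti/SAFEKEY-VAULT | src/busqueda/buscador.py | buscar_recursiva_parcial
-- ===== SOURCE A (Python) =====
-- def buscar_recursiva_parcial(lista, termino, indice=0, resultados=None):
--     """Búsqueda parcial recursiva en servicio y usuario"""
--     if resultados is None:
--         resultados = []
--
--     # Caso base
--     if indice >= len(lista):
--         return resultados
--
--     item = lista[indice]
--     servicio = item['servicio'].lower()
--     usuario = item['usuario'].lower()
--
--     if termino in servicio or termino in usuario:
--         resultados.append(item)
--
--     # Llamada recursiva
--     return buscar_recursiva_parcial(lista, termino, indice + 1, resultados)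
-- ===== SOURCE B (Python) =====
-- def buscar_recursiva_parcial(lista, termino, indice=0, resultados=None):
--     """Busqueda parcial por etapas: materializar los items desde indice,
--     filtrar las coincidencias, concatenar al acumulador."""
--     pendientes = [lista[i] for i in range(indice, len(lista))]
--     coincidencias = [it for it in pendientes
--                      if termino in it['servicio'].lower()
--                      or termino in it['usuario'].lower()]
--     if resultados is None:
--         return coincidencias
--     resultados.extend(coincidencias)
--     return resultados
-- ===== Notes on version B (the rewrite author's own statement) =====
-- stated objective: simpler
-- what changed: Replaced the tail recursion threading a mutable accumulator through call frames by three staged passes: materialize the items from indice, filter the matches with a comprehension, then concatenate the matches onto the accumulator in one step.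
import Mathlib
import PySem

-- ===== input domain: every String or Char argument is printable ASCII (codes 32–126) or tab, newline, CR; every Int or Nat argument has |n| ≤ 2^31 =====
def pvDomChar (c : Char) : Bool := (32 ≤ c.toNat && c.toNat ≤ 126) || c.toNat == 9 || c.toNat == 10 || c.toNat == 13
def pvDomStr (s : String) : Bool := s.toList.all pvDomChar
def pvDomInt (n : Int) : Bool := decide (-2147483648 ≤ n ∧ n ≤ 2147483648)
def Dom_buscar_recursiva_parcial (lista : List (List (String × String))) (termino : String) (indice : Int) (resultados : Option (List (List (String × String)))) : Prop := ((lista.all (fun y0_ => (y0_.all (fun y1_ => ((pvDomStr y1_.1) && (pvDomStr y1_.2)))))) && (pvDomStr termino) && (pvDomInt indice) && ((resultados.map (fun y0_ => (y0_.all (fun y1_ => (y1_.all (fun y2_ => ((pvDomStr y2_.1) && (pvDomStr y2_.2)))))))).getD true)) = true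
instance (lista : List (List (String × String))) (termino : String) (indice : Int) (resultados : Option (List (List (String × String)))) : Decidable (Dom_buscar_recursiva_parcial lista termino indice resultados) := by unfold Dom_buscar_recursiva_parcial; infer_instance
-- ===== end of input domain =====

-- ===== PORT A =====
-- B replaces A's accumulator-threading tail recursion by three staged passes
-- (materialize, filter, concatenate); same return value (objective: simpler).
-- A mutates the passed-in resultados list by appending; B mutates it once by
-- extend — the same observable mutation where both return; the claim is about
-- the return value.
def buscar_recursiva_parcial (lista : List (List (String × String))) (termino : String) (indice : Int) (resultados : Option (List (List (String × String)))) : List (List (String × String)) :=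
  -- literal port of A: `if resultados is None: resultados = []`, base case, item lookup, append, tail call
  let res := resultados.getD []
  if _h : (lista.length : Int) ≤ indice then res
  else
    let item := (PySem.List.pyGet? lista indice).getD []
    let servicio := PySem.Str.lower (((item.lookup "servicio").getD ""))
    let usuario := PySem.Str.lower (((item.lookup "usuario").getD ""))
    let res' := if PySem.Str.isIn termino servicio || PySem.Str.isIn termino usuario then res ++ [item] else res
    buscar_recursiva_parcial lista termino (indice + 1) (some res')
termination_by ((lista.length : Int) - indice).toNat
decreasing_by omega

-- ===== PORT B =====
def buscar_recursiva_parcial_alt (lista : List (List (String × String))) (termino : String) (indice : Int) (resultados : Option (List (List (String × String)))) : List (List (String × String)) :=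
  -- literal port of B: pendientes = [lista[i] for i in range(indice, len(lista))];
  -- coincidencias = [it for it in pendientes if termino in …]; then either return
  -- coincidencias or resultados ++ coincidencias
  let pendientes := (PySem.List.pyRange indice lista.length 1).map
    (fun i => (PySem.List.pyGet? lista i).getD [])
  let coincidencias := pendientes.filter (fun it =>
    PySem.Str.isIn termino (PySem.Str.lower ((it.lookup "servicio").getD "")) ||
    PySem.Str.isIn termino (PySem.Str.lower ((it.lookup "usuario").getD "")))
  match resultados with
  | none => coincidencias
  | some res => res ++ coincidencias

-- ===== PRECONDITION & SPEC =====
-- Pre_ excludes exactly the inputs where Python A raises: a visited index out of range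
-- (IndexError, when indice < -len(lista) with the list non-empty) or a visited item
-- missing the 'servicio' or 'usuario' key (KeyError).
def Pre_buscar_recursiva_parcial (lista : List (List (String × String))) (termino : String) (indice : Int) (resultados : Option (List (List (String × String)))) : Prop :=
  ((lista.length : Int) ≤ indice) ∨
  (-(lista.length : Int) ≤ indice ∧
    ∀ item ∈ lista.drop indice.toNat,
      (item.lookup "servicio").isSome ∧ (item.lookup "usuario").isSome)
instance (lista : List (List (String × String))) (termino : String) (indice : Int) (resultados : Option (List (List (String × String)))) : Decidable (Pre_buscar_recursiva_parcial lista termino indice resultados) := by unfold Pre_buscar_recursiva_parcial; infer_instance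

def pvWitness_buscar_recursiva_parcial : (List (List (String × String))) × String × Int × (Option (List (List (String × String)))) :=
  ([[("servicio", "Gmail"), ("usuario", "bob")], [("servicio", "Bank"), ("usuario", "alice")]], "mail", 0, none)

def Spec_buscar_recursiva_parcial (lista : List (List (String × String))) (termino : String) (indice : Int) (resultados : Option (List (List (String × String)))) (out : List (List (String × String))) : Prop := out = buscar_recursiva_parcial_alt lista termino indice resultados
instance (lista : List (List (String × String))) (termino : String) (indice : Int) (resultados : Option (List (List (String × String)))) (out : List (List (String × String))) : Decidable (Spec_buscar_recursiva_parcial lista termino indice resultados out) := by unfold Spec_buscar_recursiva_parcial; infer_instance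

-- ===== CLAIM =====
def Claim_equal_buscar_recursiva_parcial : Prop := ∀ (lista : List (List (String × String))) (termino : String) (indice : Int) (resultados : Option (List (List (String × String)))), Dom_buscar_recursiva_parcial lista termino indice resultados → Pre_buscar_recursiva_parcial lista termino indice resultados → Spec_buscar_recursiva_parcial lista termino indice resultados (buscar_recursiva_parcial lista termino indice resultados)

-- ===== LEMMAS AND PROOFS =====
-- the matches B collects from position indice on (B's coincidencias)
def pvCoin (lista : List (List (String × String))) (termino : String) (indice : Int) : List (List (String × String)) :=
  ((PySem.List.pyRange indice lista.length 1).map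
    (fun i => (PySem.List.pyGet? lista i).getD [])).filter (fun it =>
    PySem.Str.isIn termino (PySem.Str.lower ((it.lookup "servicio").getD "")) ||
    PySem.Str.isIn termino (PySem.Str.lower ((it.lookup "usuario").getD "")))

theorem key_lemma (lista : List (List (String × String))) (termino : String) :
    ∀ (fuel : Nat) (indice : Int) (res : List (List (String × String))),
      (((lista.length : Int) - indice).toNat = fuel) →
      buscar_recursiva_parcial lista termino indice (some res) =
        res ++ pvCoin lista termino indice := by
  intro fuel
  induction fuel with
  | zero =>
    intro indice res h
    have hle : (lista.length : Int) ≤ indice := by omega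
    rw [buscar_recursiva_parcial]
    simp [hle, pvCoin, PySem.List.pyRange_one_eq_nil hle]
  | succ n ih =>
    intro indice res h
    have hlt : indice < (lista.length : Int) := by omega
    have hnle : ¬ (lista.length : Int) ≤ indice := by omega
    rw [buscar_recursiva_parcial]
    simp only [hnle, dif_neg, not_false_iff, Option.getD_some]
    rw [ih (indice + 1) _ (by omega)]
    unfold pvCoin
    rw [PySem.List.pyRange_one_cons hlt]
    simp only [List.map_cons, List.filter_cons]
    split_ifs with hm <;> simp [List.append_assoc]

-- ===== VERDICT =====
theorem buscar_recursiva_parcial_spec : Claim_equal_buscar_recursiva_parcial := by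
  intro lista termino indice resultados _ _
  unfold Spec_buscar_recursiva_parcial buscar_recursiva_parcial_alt
  cases resultados with
  | none =>
    have := key_lemma lista termino _ indice [] rfl
    rw [buscar_recursiva_parcial] at *
    simpa [pvCoin] using this
  | some res => simpa [pvCoin] using key_lemma lista termino _ indice res rfl
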